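-- pv_equiv track=rewrite | github.com/bo0tzz/Advent-of-Code-2018 | 05/day5_1.py | process_reactions
-- ===== SOURCE A (Python) =====
-- def equals_different_case(one: str, two: str):
--     return one.swapcase() == two
--
-- def process_reactions(l: str):
--     out = ''
--     skip = False
--     start_len = len(l)
--     for index in range(0, start_len - 1):
--         if skip:
--             skip = False
--             continue
--         if not equals_different_case(l[index], l[index + 1]):
--             out += l[index]
--             continue
--         skip = True
--     if not skip:
--         out += l[-1:]
--     return out
-- ===== SOURCE B (Python) =====
-- def process_reactions(l: str):
--     # phase 1: record the start positions of the reacting pairs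
--     pairs = []
--     last = -2
--     for p in range(len(l) - 1):
--         if p > last + 1 and l[p].swapcase() == l[p + 1]:
--             pairs.append(p)
--             last = p
--     # phase 2: stitch the surviving slices back together
--     parts = []
--     prev = 0
--     for p in pairs:
--         parts.append(l[prev:p])
--         prev = p + 2
--     parts.append(l[prev:])
--     return ''.join(parts)
-- ===== Notes on version B (the rewrite author's own statement) =====
-- stated objective: alternative
-- what changed: Replaces A's single accumulating scan (skip flag, per-character string concatenation, explicit l[-1:] tail) by two staged passes over different data: pass 1 computes only the list of reacting-pair start positions, pass 2 reconstructs the output by slicing the original string between those cut positions and joining the slices.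
import Mathlib
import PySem

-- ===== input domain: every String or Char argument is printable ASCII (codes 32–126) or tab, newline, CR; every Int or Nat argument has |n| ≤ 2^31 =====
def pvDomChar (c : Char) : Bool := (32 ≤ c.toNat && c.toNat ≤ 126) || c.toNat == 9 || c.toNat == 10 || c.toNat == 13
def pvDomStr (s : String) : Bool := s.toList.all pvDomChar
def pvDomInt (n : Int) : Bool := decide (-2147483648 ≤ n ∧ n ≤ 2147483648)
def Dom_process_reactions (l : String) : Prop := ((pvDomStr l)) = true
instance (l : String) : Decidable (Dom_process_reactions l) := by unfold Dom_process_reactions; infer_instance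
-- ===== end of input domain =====

-- B replaces A's single accumulating scan (skip flag, char-by-char concatenation, l[-1:] tail)
-- by two staged passes: collect the reacting-pair positions, then join the slices between them
-- (objective: alternative decomposition).

-- ===== PORT A =====
-- Python's str.swapcase, exact on the ASCII domain (one character)
def swapcaseChar (c : Char) : Char :=
  if c.isLower then c.toUpper else if c.isUpper then c.toLower else c

-- A's helper; it is only ever called on one-character strings, ported at Char level
def equals_different_case (one two : Char) : Bool := swapcaseChar one == two

-- the 'for index in range(0, start_len - 1)' loop with its (out, skip) state;
-- the fuel argument only makes the recursion structural (fuel = string length always suffices)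
def aLoop (cs : List Char) : Nat → Nat → List Char → Bool → List Char × Bool
  | 0, _, out, skip => (out, skip)
  | fuel + 1, index, out, skip =>
    if index < cs.length - 1 then
      if skip then aLoop cs fuel (index + 1) out false
      else if !(equals_different_case (cs.getD index ' ') (cs.getD (index + 1) ' ')) then
        aLoop cs fuel (index + 1) (out ++ [cs.getD index ' ']) false
      else aLoop cs fuel (index + 1) out true
    else (out, skip)

def process_reactions (l : String) : String :=
  let cs := l.toList
  let st := aLoop cs cs.length 0 [] false
  -- if not skip: out += l[-1:]
  String.ofList (if !st.2 then st.1 ++ PySem.List.slice cs (some (-1)) none else st.1)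

-- ===== PORT B =====
-- phase 1 of Source B: 'for p in range(len(l)-1)' collecting pair start positions, with 'last';
-- the fuel argument only makes the recursion structural (fuel = string length always suffices)
def collectPairs (cs : List Char) : Nat → Nat → Int → List Nat → List Nat
  | 0, _, _, pairs => pairs
  | fuel + 1, p, last, pairs =>
    if p < cs.length - 1 then
      if ((last + 1 < (p : Int)) && (swapcaseChar (cs.getD p ' ') == cs.getD (p + 1) ' ')) then
        collectPairs cs fuel (p + 1) (p : Int) (pairs ++ [p])
      else collectPairs cs fuel (p + 1) last pairs
    else pairs

-- phase 2 of Source B: 'for p in pairs' appending l[prev:p] to parts, then l[prev:], then join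
def buildOut (cs : List Char) (pairs : List Nat) : List Char :=
  let st := pairs.foldl
    (fun (s : List (List Char) × Nat) p =>
      (s.1 ++ [PySem.List.slice cs (some ((s.2 : Nat) : Int)) (some ((p : Nat) : Int))], p + 2))
    ([], 0)
  (st.1 ++ [PySem.List.slice cs (some ((st.2 : Nat) : Int)) none]).flatten

def process_reactions_alt (l : String) : String :=
  String.ofList (buildOut l.toList (collectPairs l.toList l.toList.length 0 (-2) []))

-- ===== PRECONDITION & SPEC =====
def Spec_process_reactions (l : String) (out : String) : Prop := out = process_reactions_alt l
instance (l : String) (out : String) : Decidable (Spec_process_reactions l out) := by unfold Spec_process_reactions; infer_instance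

-- ===== CLAIM =====
def Claim_equal_process_reactions : Prop := ∀ (l : String), Dom_process_reactions l → Spec_process_reactions l (process_reactions l)

-- ===== LEMMAS AND PROOFS =====

-- canonical one-pass reaction, the common meaning of both programs
def onePass : List Char → List Char
  | [] => []
  | [c] => [c]
  | a :: b :: rest =>
      if swapcaseChar a = b then onePass rest else a :: onePass (b :: rest)

lemma onePass_short (xs : List Char) (h : xs.length ≤ 1) : onePass xs = xs := by
  match xs, h with
  | [], _ => rfl
  | [c], _ => rfl

-- ---------- A-side: aLoop + tail equals onePass ----------

-- enough fuel: the result does not depend on the exact fuel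
lemma aLoop_fuel (cs : List Char) :
    ∀ f1 f2 i out skip, cs.length - 1 - i ≤ f1 → cs.length - 1 - i ≤ f2 →
      aLoop cs f1 i out skip = aLoop cs f2 i out skip := by
  intro f1
  induction f1 with
  | zero =>
      intro f2 i out skip h1 h2
      have hni : ¬ i < cs.length - 1 := by omega
      cases f2 <;> simp [aLoop, hni]
  | succ f1 ih =>
      intro f2 i out skip h1 h2
      by_cases hi : i < cs.length - 1
      · obtain ⟨g, rfl⟩ : ∃ g, f2 = g + 1 := ⟨f2 - 1, by omega⟩
        simp only [aLoop, hi, if_true]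
        split_ifs <;> exact ih g (i + 1) _ _ (by omega) (by omega)
      · cases f2 <;> simp [aLoop, hi]

-- A's result from index i onward (loop + the 'out += l[-1:]' tail), skip = false
def aRun (cs : List Char) (fuel i : Nat) (out : List Char) : List Char :=
  let st := aLoop cs fuel i out false
  if !st.2 then st.1 ++ cs.drop (cs.length - 1) else st.1

lemma aRun_eq (cs : List Char) :
    ∀ fuel i out, cs.length - 1 - i ≤ fuel → (i = 0 ∨ i < cs.length) →
      aRun cs fuel i out = out ++ onePass (cs.drop i) := by
  intro fuel
  induction fuel with
  | zero =>
      intro i out h hi0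
      unfold aRun
      simp only [aLoop, Bool.not_false, if_true]
      by_cases h0 : cs = []
      · subst h0; simp [onePass]
      · have hlen : 0 < cs.length := List.length_pos_iff.mpr h0
        have hieq : i = cs.length - 1 := by omega
        subst hieq
        have hlt : cs.length - 1 < cs.length := by omega
        rw [List.drop_eq_getElem_cons hlt,
          List.drop_eq_nil_of_le (by omega : cs.length ≤ cs.length - 1 + 1)]
        simp [onePass]
  | succ fuel ih =>
      intro i out h hi0
      by_cases hi : i < cs.length - 1
      · have hia : i < cs.length := by omega
        have hib : i + 1 < cs.length := by omega
        have hdrop : cs.drop i = cs[i] :: cs.drop (i + 1) :=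
          List.drop_eq_getElem_cons hia
        have hdrop1 : cs.drop (i + 1) = cs[i + 1] :: cs.drop (i + 2) :=
          List.drop_eq_getElem_cons hib
        by_cases hr : swapcaseChar cs[i] = cs[i + 1]
        · -- reacting pair: the loop sets skip, the next step clears it
          unfold aRun
          simp only [aLoop, hi, if_true, if_neg (by simp : ¬ (false : Bool) = true),
            List.getD_eq_getElem _ _ hia, List.getD_eq_getElem _ _ hib,
            equals_different_case, hr]
          simp only [beq_self_eq_true, Bool.not_true, Bool.false_eq_true, if_false]
          rw [aLoop_fuel cs fuel (fuel + 1) (i + 1) out true (by omega) (by omega)]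
          simp only [aLoop]
          by_cases hi1 : i + 1 < cs.length - 1
          · simp only [hi1, if_true]
            have := ih (i + 2) out (by omega) (Or.inr (by omega))
            unfold aRun at this
            rw [this, hdrop, hdrop1, onePass, if_pos hr]
          · simp only [hi1, if_false]
            have hnil : cs.drop (i + 2) = [] :=
              List.drop_eq_nil_of_le (by omega)
            simp only [Bool.not_true, Bool.false_eq_true, if_false]
            rw [hdrop, hdrop1, hnil, onePass, if_pos hr, onePass]
            simp
        · -- no reaction: keep cs[i] and continue
          have step : aRun cs (fuel + 1) i out = aRun cs fuel (i + 1) (out ++ [cs[i]]) := by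
            unfold aRun
            simp only [aLoop, hi, if_true, if_neg (by simp : ¬ (false : Bool) = true),
              List.getD_eq_getElem _ _ hia, List.getD_eq_getElem _ _ hib,
              equals_different_case]
            simp [hr]
          rw [step, ih (i + 1) (out ++ [cs[i]]) (by omega) (Or.inr hib),
            hdrop, hdrop1, onePass, if_neg hr, ← hdrop1, List.append_assoc,
            List.singleton_append]
      · -- the loop exits immediately with skip = false
        unfold aRun
        simp only [aLoop, hi, if_false, Bool.not_false, if_true]
        by_cases h0 : cs = []
        · subst h0; simp [onePass]
        · have hlen : 0 < cs.length := List.length_pos_iff.mpr h0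
          have hieq : i = cs.length - 1 := by omega
          subst hieq
          have hlt : cs.length - 1 < cs.length := by omega
          rw [List.drop_eq_getElem_cons hlt,
            List.drop_eq_nil_of_le (by omega : cs.length ≤ cs.length - 1 + 1)]
          simp [onePass]

-- ---------- B-side: collectPairs + buildOut equals onePass ----------

-- one-step facts about collectPairs
lemma collect_stop (cs : List Char) (fuel p : Nat) (last : Int) (acc : List Nat)
    (h : ¬ p < cs.length - 1) : collectPairs cs fuel p last acc = acc := by
  cases fuel <;> simp [collectPairs, h]

lemma collect_step_true (cs : List Char) (fuel p : Nat) (last : Int) (acc : List Nat)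
    (hp : p < cs.length - 1)
    (hg : ((decide (last + 1 < (p : Int))) && (swapcaseChar (cs.getD p ' ') == cs.getD (p + 1) ' ')) = true) :
    collectPairs cs (fuel + 1) p last acc = collectPairs cs fuel (p + 1) (p : Int) (acc ++ [p]) := by
  simp only [collectPairs, hp, if_true, hg, if_true]

lemma collect_step_false (cs : List Char) (fuel p : Nat) (last : Int) (acc : List Nat)
    (hp : p < cs.length - 1)
    (hg : ((decide (last + 1 < (p : Int))) && (swapcaseChar (cs.getD p ' ') == cs.getD (p + 1) ' ')) = false) :
    collectPairs cs (fuel + 1) p last acc = collectPairs cs fuel (p + 1) last acc := by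
  simp only [collectPairs, hp, if_true, hg, Bool.false_eq_true, if_false]

-- enough fuel: the result does not depend on the exact fuel
lemma collect_fuel (cs : List Char) :
    ∀ f1 f2 p last acc, cs.length - 1 - p ≤ f1 → cs.length - 1 - p ≤ f2 →
      collectPairs cs f1 p last acc = collectPairs cs f2 p last acc := by
  intro f1
  induction f1 with
  | zero =>
      intro f2 p last acc h1 h2
      have hnp : ¬ p < cs.length - 1 := by omega
      rw [collect_stop cs 0 p last acc hnp, collect_stop cs f2 p last acc hnp]
  | succ f1 ih =>
      intro f2 p last acc h1 h2
      by_cases hp : p < cs.length - 1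
      · obtain ⟨g, rfl⟩ : ∃ g, f2 = g + 1 := ⟨f2 - 1, by omega⟩
        simp only [collectPairs, hp, if_true]
        split_ifs <;> exact ih g (p + 1) _ _ (by omega) (by omega)
      · rw [collect_stop cs (f1 + 1) p last acc hp, collect_stop cs f2 p last acc hp]

-- the accumulator of collectPairs is a prefix
lemma collect_acc (cs : List Char) :
    ∀ fuel p last acc, collectPairs cs fuel p last acc = acc ++ collectPairs cs fuel p last [] := by
  intro fuel
  induction fuel with
  | zero =>
      intro p last acc
      simp [collectPairs]
  | succ fuel ih =>
      intro p last acc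
      by_cases hp : p < cs.length - 1
      · cases hg : ((decide (last + 1 < (p : Int))) && (swapcaseChar (cs.getD p ' ') == cs.getD (p + 1) ' ')) with
        | true =>
            rw [collect_step_true cs fuel p last acc hp hg, collect_step_true cs fuel p last [] hp hg,
              ih (p + 1) (p : Int) (acc ++ [p]), ih (p + 1) (p : Int) ([] ++ [p])]
            simp
        | false =>
            rw [collect_step_false cs fuel p last acc hp hg, collect_step_false cs fuel p last [] hp hg,
              ih (p + 1) last acc]
      · rw [collect_stop cs (fuel + 1) p last acc hp, collect_stop cs (fuel + 1) p last [] hp]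
        simp

-- every collected position is ≥ the current index
lemma collect_ge (cs : List Char) :
    ∀ fuel p last x, x ∈ collectPairs cs fuel p last [] → p ≤ x := by
  intro fuel
  induction fuel with
  | zero =>
      intro p last x hx
      simp [collectPairs] at hx
  | succ fuel ih =>
      intro p last x hx
      by_cases hp : p < cs.length - 1
      · cases hg : ((decide (last + 1 < (p : Int))) && (swapcaseChar (cs.getD p ' ') == cs.getD (p + 1) ' ')) with
        | true =>
            rw [collect_step_true cs fuel p last [] hp hg,
              collect_acc cs fuel (p + 1) (p : Int) ([] ++ [p])] at hx
            rcases List.mem_append.mp hx with h1 | h2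
            · simp at h1; omega
            · have := ih (p + 1) (p : Int) x h2; omega
        | false =>
            rw [collect_step_false cs fuel p last [] hp hg] at hx
            have := ih (p + 1) last x hx; omega
      · rw [collect_stop cs (fuel + 1) p last [] hp] at hx
        simp at hx

-- direct meaning of phase 2: slices between consecutive cut positions
def recJoin (cs : List Char) (prev : Nat) : List Nat → List Char
  | [] => cs.drop prev
  | p :: ps => (cs.drop prev).take (p - prev) ++ recJoin cs (p + 2) ps

set_option maxRecDepth 4000 in
lemma buildOut_foldl (cs : List Char) :
    ∀ pairs parts prev,
      (((pairs.foldl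
          (fun (s : List (List Char) × Nat) p =>
            (s.1 ++ [PySem.List.slice cs (some ((s.2 : Nat) : Int)) (some ((p : Nat) : Int))], p + 2))
          (parts, prev)).1 ++
        [PySem.List.slice cs (some (((pairs.foldl
          (fun (s : List (List Char) × Nat) p =>
            (s.1 ++ [PySem.List.slice cs (some ((s.2 : Nat) : Int)) (some ((p : Nat) : Int))], p + 2))
          (parts, prev)).2 : Nat) : Int)) none]).flatten)
      = parts.flatten ++ recJoin cs prev pairs := by
  intro pairs
  induction pairs with
  | nil =>
      intro parts prev
      simp [recJoin, PySem.List.slice_from_natCast]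
  | cons p ps ih =>
      intro parts prev
      simp only [List.foldl_cons]
      rw [ih (parts ++ [PySem.List.slice cs (some (prev : Int)) (some (p : Int))]) (p + 2)]
      simp [recJoin, PySem.List.slice_natCast]

lemma buildOut_eq (cs : List Char) (pairs : List Nat) :
    buildOut cs pairs = recJoin cs 0 pairs := by
  unfold buildOut
  have := buildOut_foldl cs pairs [] 0
  simp only [List.flatten_nil, List.nil_append] at this
  exact this

-- recJoin steps past one kept character
lemma recJoin_cons (cs : List Char) (i : Nat) (pairs : List Nat)
    (hi : i < cs.length) (hhd : ∀ x ∈ pairs, i + 1 ≤ x) :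
    recJoin cs i pairs = cs[i] :: recJoin cs (i + 1) pairs := by
  cases pairs with
  | nil =>
      simp only [recJoin]
      exact List.drop_eq_getElem_cons hi
  | cons p ps =>
      have hp : i + 1 ≤ p := hhd p (by simp)
      simp only [recJoin]
      rw [List.drop_eq_getElem_cons hi]
      have : p - i = (p - (i + 1)) + 1 := by omega
      rw [this, List.take_succ_cons, List.cons_append]

-- main B-side invariant
lemma recJoin_collect (cs : List Char) :
    ∀ fuel i last, cs.length - 1 - i ≤ fuel → last + 1 < (i : Int) →
      recJoin cs i (collectPairs cs fuel i last []) = onePass (cs.drop i) := by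
  intro fuel
  induction fuel with
  | zero =>
      intro i last h hl
      rw [collect_stop cs 0 i last [] (by omega), recJoin]
      exact (onePass_short _ (by simp; omega)).symm
  | succ fuel ih =>
      intro i last h hl
      by_cases hi : i < cs.length - 1
      · have hia : i < cs.length := by omega
        have hib : i + 1 < cs.length := by omega
        have hdrop : cs.drop i = cs[i] :: cs.drop (i + 1) :=
          List.drop_eq_getElem_cons hia
        have hdrop1 : cs.drop (i + 1) = cs[i + 1] :: cs.drop (i + 2) :=
          List.drop_eq_getElem_cons hib
        by_cases hr : swapcaseChar cs[i] = cs[i + 1]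
        · -- reacting pair at i
          have hb : (swapcaseChar (cs.getD i ' ') == cs.getD (i + 1) ' ') = true := by
            rw [List.getD_eq_getElem _ _ hia, List.getD_eq_getElem _ _ hib]
            exact beq_iff_eq.mpr hr
          have hg : ((decide (last + 1 < (i : Int))) && (swapcaseChar (cs.getD i ' ') == cs.getD (i + 1) ' ')) = true := by
            simp only [Bool.and_eq_true, decide_eq_true_eq]; exact ⟨hl, hb⟩
          rw [collect_step_true cs fuel i last [] hi hg,
            collect_acc cs fuel (i + 1) (i : Int) ([] ++ [i])]
          have hskip : collectPairs cs fuel (i + 1) (i : Int) [] = collectPairs cs fuel (i + 2) (i : Int) [] := by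
            rw [collect_fuel cs fuel (fuel + 1) (i + 1) (i : Int) [] (by omega) (by omega)]
            by_cases hi1 : i + 1 < cs.length - 1
            · have hg1 : ((decide ((i : Int) + 1 < ((i + 1 : Nat) : Int))) && (swapcaseChar (cs.getD (i + 1) ' ') == cs.getD (i + 1 + 1) ' ')) = false := by
                have hlt : (decide ((i : Int) + 1 < ((i + 1 : Nat) : Int))) = false := by
                  simp only [decide_eq_false_iff_not]; push_cast; omega
                simp only [hlt, Bool.false_and]
              rw [collect_step_false cs fuel (i + 1) (i : Int) [] hi1 hg1]
            · rw [collect_stop cs (fuel + 1) (i + 1) (i : Int) [] hi1,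
                collect_stop cs fuel (i + 2) (i : Int) [] (by omega)]
          rw [hskip]
          simp only [List.nil_append, List.singleton_append]
          rw [recJoin]
          have h0 : i - i = 0 := by omega
          rw [h0, List.take_zero, List.nil_append,
            ih (i + 2) (i : Int) (by omega) (by push_cast; omega),
            hdrop, hdrop1, onePass, if_pos hr]
        · -- no reaction at i
          have hb : (swapcaseChar (cs.getD i ' ') == cs.getD (i + 1) ' ') = false := by
            rw [List.getD_eq_getElem _ _ hia, List.getD_eq_getElem _ _ hib]
            exact beq_eq_false_iff_ne.mpr hr
          have hg : ((decide (last + 1 < (i : Int))) && (swapcaseChar (cs.getD i ' ') == cs.getD (i + 1) ' ')) = false := by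
            simp only [hb, Bool.and_false]
          rw [collect_step_false cs fuel i last [] hi hg]
          have hge : ∀ x ∈ collectPairs cs fuel (i + 1) last [], i + 1 ≤ x := fun x hx =>
            collect_ge cs fuel (i + 1) last x hx
          rw [recJoin_cons cs i _ hia hge,
            ih (i + 1) last (by omega) (by push_cast; omega),
            hdrop, hdrop1, onePass, if_neg hr, ← hdrop1]
      · rw [collect_stop cs (fuel + 1) i last [] hi, recJoin]
        exact (onePass_short _ (by simp; omega)).symm

-- ===== VERDICT (by name: the statement is the Claim_ definition above) =====
theorem process_reactions_spec : Claim_equal_process_reactions := by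
  intro l _
  unfold Spec_process_reactions process_reactions process_reactions_alt
  simp only [PySem.List.slice_from_neg_one]
  show String.ofList (aRun l.toList l.toList.length 0 []) = _
  rw [aRun_eq l.toList l.toList.length 0 [] (by omega) (Or.inl rfl),
    buildOut_eq, recJoin_collect l.toList l.toList.length 0 (-2) (by omega) (by norm_num)]
  rfl
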